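-- pv_equiv track=rewrite | github.com/simonfqy/SimonfqyGitHub | lintcode/medium/692_sliding_window_unique_elements_sum.py | slidingWindowUniqueElementsSum
-- ===== SOURCE A (Python) =====
-- from collections import defaultdict
--
-- def slidingWindowUniqueElementsSum(nums, k):
--     n = len(nums)
--     num_to_occurrence = defaultdict(int)
--     left = 0
--     unique_element_count = 0
--     total_count = 0
--     for right in range(n):
--         new_num = nums[right]
--         num_to_occurrence[new_num] += 1
--         if num_to_occurrence[new_num] == 1:
--             unique_element_count += 1
--         elif num_to_occurrence[new_num] == 2:
--             unique_element_count -= 1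
--         if right >= k:
--             removed_num = nums[left]
--             left += 1
--             num_to_occurrence[removed_num] -= 1
--             if num_to_occurrence[removed_num] == 0:
--                 unique_element_count -= 1
--             elif num_to_occurrence[removed_num] == 1:
--                 unique_element_count += 1
--         if right >= k - 1 or right == n - 1:
--             total_count += unique_element_count
--     return total_count
-- ===== SOURCE B (Python) =====
-- from collections import Counter
--
-- def unique_count(window):
--     return sum(1 for v in Counter(window).values() if v == 1)
--
-- def slidingWindowUniqueElementsSum(nums, k):
--     if k <= 0:
--         return 0
--     n = len(nums)
--     return sum(unique_count(nums[i:i + k]) for i in range(max(n - k + 1, 1)))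
-- ===== Notes on version B (the rewrite author's own statement) =====
-- stated objective: simpler
-- what changed: B replaces A's incremental sliding-window bookkeeping (a running occurrence dict and unique counter updated on both window edges) by a brute-force recompute: for each counted window it builds a fresh Counter of the slice and sums the keys with count 1, with k<=0 giving 0 and the single clamped whole-array window when n<k.
import Mathlib
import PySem

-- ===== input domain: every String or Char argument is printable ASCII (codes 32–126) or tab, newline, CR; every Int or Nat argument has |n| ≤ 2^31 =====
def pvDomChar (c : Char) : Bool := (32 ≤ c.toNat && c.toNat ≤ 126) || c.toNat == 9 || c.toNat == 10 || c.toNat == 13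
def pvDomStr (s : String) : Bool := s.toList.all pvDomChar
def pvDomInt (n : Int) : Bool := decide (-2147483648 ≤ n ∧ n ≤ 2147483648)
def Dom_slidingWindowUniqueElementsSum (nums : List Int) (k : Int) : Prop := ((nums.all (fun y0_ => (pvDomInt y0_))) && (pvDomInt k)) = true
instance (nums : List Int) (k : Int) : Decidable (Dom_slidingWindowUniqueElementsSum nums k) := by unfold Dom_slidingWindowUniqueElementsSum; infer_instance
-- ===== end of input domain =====

-- B recomputes each window's unique count from a fresh Counter of the slice instead of
-- maintaining A's incremental dict/unique-count state; objective: simpler (not faster).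

-- ===== PORT A =====
-- the body of A's 'for right in range(n)' loop, as a helper (state = (dict, left, unique_element_count, total_count))
def aStep (nums : List Int) (k : Int) (st : PySem.Dict Int Int × Int × Int × Int) (right : Int) :
    PySem.Dict Int Int × Int × Int × Int :=
  let d := st.1
  let left := st.2.1
  let uc := st.2.2.1
  let tc := st.2.2.2
  let newNum := PySem.List.pyGetD nums right 0
  let d := d.modify newNum 0 (· + 1)
  let uc := if d.getD newNum 0 == 1 then uc + 1 else if d.getD newNum 0 == 2 then uc - 1 else uc
  let s2 :=
    if right ≥ k then
      let removedNum := PySem.List.pyGetD nums left 0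
      let left := left + 1
      let d := d.modify removedNum 0 (· - 1)
      let uc := if d.getD removedNum 0 == 0 then uc - 1 else if d.getD removedNum 0 == 1 then uc + 1 else uc
      (d, left, uc)
    else (d, left, uc)
  let tc := if right ≥ k - 1 ∨ right = (nums.length : Int) - 1 then tc + s2.2.2 else tc
  (s2.1, s2.2.1, s2.2.2, tc)

def slidingWindowUniqueElementsSum (nums : List Int) (k : Int) : Int :=
  let n : Int := (nums.length : Int)
  ((PySem.List.pyRange 0 n 1).foldl (aStep nums k) (PySem.Dict.empty, 0, 0, 0)).2.2.2

-- ===== PORT B =====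
-- Source B's unique_count: number of values equal to 1 in Counter(window)
def uniqueCountAlt (window : List Int) : Int :=
  ((((PySem.Dict.counter window).values).filter (fun v => v == 1)).length : Int)

def slidingWindowUniqueElementsSum_alt (nums : List Int) (k : Int) : Int :=
  if k ≤ 0 then 0
  else
    let n : Int := (nums.length : Int)
    ((PySem.List.pyRange 0 (max (n - k + 1) 1) 1).map
      (fun i => uniqueCountAlt (PySem.List.slice nums (some i) (some (i + k))))).sum

-- ===== PRECONDITION & SPEC =====
def Spec_slidingWindowUniqueElementsSum (nums : List Int) (k : Int) (out : Int) : Prop := out = slidingWindowUniqueElementsSum_alt nums k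
instance (nums : List Int) (k : Int) (out : Int) : Decidable (Spec_slidingWindowUniqueElementsSum nums k out) := by unfold Spec_slidingWindowUniqueElementsSum; infer_instance

-- ===== CLAIM (what is proved, stated in full; the proofs are below) =====
def Claim_equal_slidingWindowUniqueElementsSum : Prop := ∀ (nums : List Int) (k : Int), Dom_slidingWindowUniqueElementsSum nums k → Spec_slidingWindowUniqueElementsSum nums k (slidingWindowUniqueElementsSum nums k)

-- ===== LEMMAS AND PROOFS =====

def uct (w : List Int) : Int :=
  ((PySem.Set.ofList w).countP (fun y => (w.count y : Int) == 1) : Int)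

lemma countP_delta (l : List Int) (hl : l.Nodup) (x : Int) (p q : Int → Bool)
    (h : ∀ y ∈ l, y ≠ x → p y = q y) :
    (l.countP p : Int) = (l.countP q : Int) +
      (if x ∈ l then (if p x then (1:Int) else 0) - (if q x then 1 else 0) else 0) := by
  induction l with
  | nil => simp
  | cons a t ih =>
    rcases List.nodup_cons.mp hl with ⟨hat, hnt⟩
    have ih' := ih hnt (fun y hy hyx => h y (List.mem_cons_of_mem a hy) hyx)
    by_cases hax : a = x
    · subst hax
      have hxt : a ∉ t := hat
      simp only [List.countP_cons, List.mem_cons, true_or, if_pos]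
      push_cast
      rw [ih']
      simp only [hxt, if_neg, if_false]
      split_ifs <;> omega
    · have hpa : p a = q a := h a List.mem_cons_self hax
      simp only [List.countP_cons]
      push_cast
      rw [ih', hpa]
      have hmm : (x ∈ a :: t) ↔ (x ∈ t) := by
        simp only [List.mem_cons, or_iff_right_iff_imp]
        intro h'; exact absurd h'.symm hax
      by_cases hxt : x ∈ t
      · simp only [hxt, hmm.mpr hxt, if_pos]; split_ifs <;> omega
      · have : x ∉ a :: t := fun hc => hxt (hmm.mp hc)
        simp only [hxt, this, if_neg, if_false]; omega

lemma uct_perm {w w' : List Int} (h : w.Perm w') : uct w = uct w' := by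
  unfold uct
  have h1 : (PySem.Set.ofList w).Perm (PySem.Set.ofList w') := by
    apply (List.perm_ext_iff_of_nodup (PySem.Set.nodup_ofList _) (PySem.Set.nodup_ofList _)).mpr
    intro a; rw [PySem.Set.mem_ofList, PySem.Set.mem_ofList]; exact h.mem_iff
  rw [h1.countP_eq]
  congr 1
  apply List.countP_congr
  intro a _; rw [h.count_eq]

lemma uct_nil : uct [] = 0 := rfl

lemma uct_cons (y : Int) (w : List Int) :
    uct (y :: w) = uct w + (if y ∈ w then (if w.count y = 1 then -1 else 0) else 1) := by
  have hcount : ∀ z : Int, (y :: w).count z = w.count z + if y = z then 1 else 0 := by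
    intro z; simp [List.count_cons]
  by_cases hyw : y ∈ w
  · have hperm : (PySem.Set.ofList (y :: w)).Perm (PySem.Set.ofList w) := by
      apply (List.perm_ext_iff_of_nodup (PySem.Set.nodup_ofList _) (PySem.Set.nodup_ofList _)).mpr
      intro a
      rw [PySem.Set.mem_ofList, PySem.Set.mem_ofList]
      simp only [List.mem_cons, or_iff_right_iff_imp]
      intro h'; subst h'; exact hyw
    unfold uct
    rw [hperm.countP_eq]
    rw [countP_delta (PySem.Set.ofList w) (PySem.Set.nodup_ofList _) y
      (fun z => ((y :: w).count z : Int) == 1) (fun z => (w.count z : Int) == 1)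
      (fun z _ hzx => by
        have hz : (y :: w).count z = w.count z := by rw [hcount z]; simp [Ne.symm hzx]
        simp only [hz])]
    have h1 : (((y :: w).count y : Int) == 1) = false := by
      rw [hcount y]
      have := List.one_le_count_iff.mpr hyw
      simp; omega
    have h2 : y ∈ PySem.Set.ofList w := (PySem.Set.mem_ofList _ _).mpr hyw
    simp only [h1, h2, if_pos, if_false, Bool.false_eq_true]
    by_cases hc : w.count y = 1
    · simp [hc, hyw]
    · have hne : ((w.count y : Int) == 1) = false := by simp; omega
      simp [hne, hc, hyw]
  · have hnodup : (y :: PySem.Set.ofList w).Nodup :=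
      List.nodup_cons.mpr ⟨fun hc => hyw ((PySem.Set.mem_ofList _ _).mp hc), PySem.Set.nodup_ofList _⟩
    have hperm : (PySem.Set.ofList (y :: w)).Perm (y :: PySem.Set.ofList w) := by
      apply (List.perm_ext_iff_of_nodup (PySem.Set.nodup_ofList _) hnodup).mpr
      intro a
      rw [PySem.Set.mem_ofList]
      simp [List.mem_cons, PySem.Set.mem_ofList]
    unfold uct
    rw [hperm.countP_eq, List.countP_cons]
    have h1 : (((y :: w).count y : Int) == 1) = true := by
      rw [hcount y]; simp [List.count_eq_zero_of_not_mem hyw]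
    have h2 : (PySem.Set.ofList w).countP (fun z => ((y :: w).count z : Int) == 1)
        = (PySem.Set.ofList w).countP (fun z => (w.count z : Int) == 1) := by
      apply List.countP_congr
      intro a ha
      have hay : y ≠ a := by
        rintro rfl; exact hyw ((PySem.Set.mem_ofList _ _).mp ha)
      have hz : (y :: w).count a = w.count a := by rw [hcount a]; simp [hay]
      simp only [hz]
    rw [h2, h1]
    simp [hyw]

lemma uct_append (w : List Int) (x : Int) :
    uct (w ++ [x]) = uct w + (if x ∈ w then (if w.count x = 1 then -1 else 0) else 1) := by
  rw [uct_perm (List.perm_append_singleton x w)]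
  exact uct_cons x w

lemma uniqueCountAlt_eq (w : List Int) : uniqueCountAlt w = uct w := by
  simp [uniqueCountAlt, uct, PySem.Dict.values, PySem.Dict.items_counter, List.filter_map,
    List.countP_eq_length_filter, Function.comp_def]

def leftN (k : Int) : Nat → Nat
  | 0 => 0
  | r+1 => leftN k r + (if k ≤ (r:Int) then 1 else 0)

lemma leftN_le (k : Int) (r : Nat) : leftN k r ≤ r := by
  induction r with
  | zero => simp [leftN]
  | succ r ih => unfold leftN; split_ifs <;> omega

def winA (nums : List Int) (k : Int) (r : Nat) : List Int := (nums.take r).drop (leftN k r)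

def TA (nums : List Int) (k : Int) : Nat → Int
  | 0 => 0
  | r+1 => TA nums k r +
      (if k - 1 ≤ (r:Int) ∨ (r:Int) = (nums.length:Int) - 1 then uct (winA nums k (r+1)) else 0)

lemma uc_step_add (W : List Int) (x uc : Int) (huc : uc = uct W) (c : Int)
    (hc : c = (W.count x : Int) + 1) :
    (if c == 1 then uc + 1 else if c == 2 then uc - 1 else uc) = uct (W ++ [x]) := by
  rw [uct_append, huc, hc]
  by_cases hm : x ∈ W
  · have h1 : 1 ≤ W.count x := List.one_le_count_iff.mpr hm
    by_cases h2 : W.count x = 1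
    · simp [h2, hm]; omega
    · have hb1 : (((W.count x : Int) + 1) == 1) = false := by simp; omega
      have hb2 : (((W.count x : Int) + 1) == 2) = false := by simp; omega
      simp [hb1, hb2, hm, h2]
  · have h0 : W.count x = 0 := List.count_eq_zero.mpr hm
    simp [h0, hm]

lemma uc_step_remove (W2 : List Int) (y uc : Int) (huc : uc = uct (y :: W2)) (c : Int)
    (hc : c = (W2.count y : Int)) :
    (if c == 0 then uc - 1 else if c == 1 then uc + 1 else uc) = uct W2 := by
  rw [huc, uct_cons]
  by_cases hm : y ∈ W2
  · have h1 : 1 ≤ W2.count y := List.one_le_count_iff.mpr hm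
    by_cases h2 : W2.count y = 1
    · simp [hc, h2, hm]
    · have hb0 : ((W2.count y : Int) == 0) = false := by simp; omega
      have hb1 : ((W2.count y : Int) == 1) = false := by simp; omega
      simp [hc, hb0, hb1, hm, h2]
  · simp [hc, List.count_eq_zero.mpr hm, hm]

lemma A_fold (nums : List Int) (k : Int) (r : Nat) (hr : r ≤ nums.length) :
    ∃ d : PySem.Dict Int Int,
      (PySem.List.pyRange 0 (r:Int) 1).foldl (aStep nums k) (PySem.Dict.empty, 0, 0, 0)
        = (d, ((leftN k r : Nat) : Int), uct (winA nums k r), TA nums k r)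
      ∧ ∀ y, d.getD y 0 = ((winA nums k r).count y : Int) := by
  induction r with
  | zero =>
    refine ⟨PySem.Dict.empty, ?_, ?_⟩
    · simp [PySem.List.pyRange_one_eq_nil, winA, leftN, TA, uct_nil]
    · intro y; simp [winA, PySem.Dict.getD_empty]
  | succ r ih =>
    obtain ⟨d, hfold, hd⟩ := ih (Nat.le_of_succ_le hr)
    have hrn : r < nums.length := hr
    have hsplit : PySem.List.pyRange 0 ((r+1:Nat):Int) 1
        = PySem.List.pyRange 0 (r:Int) 1 ++ [(r:Int)] := by
      push_cast
      exact PySem.List.pyRange_one_succ_right (by positivity)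
    rw [hsplit, List.foldl_append, hfold, List.foldl_cons, List.foldl_nil]
    -- abbreviations
    set W := winA nums k r with hW
    have hlen_take : (nums.take r).length = r := by
      rw [List.length_take]; omega
    have hlt : leftN k r ≤ r := leftN_le k r
    have hx : PySem.List.pyGetD nums (r:Int) 0 = nums[r] := by
      rw [PySem.List.pyGetD_natCast, List.getD_eq_getElem nums 0 hrn]
    have hW1 : (nums.take (r+1)).drop (leftN k r) = W ++ [nums[r]] := by
      rw [List.take_succ, List.getElem?_eq_getElem hrn,
        List.drop_append_of_le_length (by omega)]
      rfl
    have hd1 : ∀ y, (d.modify nums[r] 0 (· + 1)).getD y 0 = ((W ++ [nums[r]]).count y : Int) := by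
      intro y
      rw [PySem.Dict.getD_modify]
      by_cases hy : y = nums[r]
      · rw [if_pos hy, hd nums[r]]
        simp [hy, List.count_append, List.count_singleton]
      · rw [if_neg hy, hd y]
        have : (nums[r] == y) = false := by rw [beq_eq_false_iff_ne]; exact fun h => hy h.symm
        simp [List.count_append, List.count_singleton, this]
    have huc1 : (if (d.modify nums[r] 0 (· + 1)).getD nums[r] 0 == 1 then uct W + 1
        else if (d.modify nums[r] 0 (· + 1)).getD nums[r] 0 == 2 then uct W - 1 else uct W)
        = uct (W ++ [nums[r]]) := by
      apply uc_step_add W _ _ rfl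
      rw [hd1]; simp [List.count_append, List.count_singleton]
    by_cases hk : k ≤ (r:Int)
    · -- removal branch
      have hlN : leftN k (r+1) = leftN k r + 1 := by simp [leftN, hk]
      have hLlt : leftN k r < nums.length := by omega
      have hrm : PySem.List.pyGetD nums ((leftN k r : Nat) : Int) 0 = nums[leftN k r] := by
        rw [PySem.List.pyGetD_natCast, List.getD_eq_getElem nums 0 hLlt]
      have hW2 : W ++ [nums[r]] = nums[leftN k r] :: winA nums k (r+1) := by
        rw [← hW1, winA, hlN]
        have hL1 : leftN k r < (nums.take (r+1)).length := by
          rw [List.length_take]; omega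
        conv_lhs => rw [← List.getElem_cons_drop hL1]
        congr 1
        exact List.getElem_take
      have hcnt2 : ∀ y, (W ++ [nums[r]]).count y
          = (winA nums k (r+1)).count y + if nums[leftN k r] == y then 1 else 0 := by
        intro y; rw [hW2, List.count_cons]
      have hd2 : ∀ y, ((d.modify nums[r] 0 (· + 1)).modify nums[leftN k r] 0 (· - 1)).getD y 0
          = ((winA nums k (r+1)).count y : Int) := by
        intro y
        rw [PySem.Dict.getD_modify]
        by_cases hy : y = nums[leftN k r]
        · subst hy
          rw [if_pos rfl, hd1, hcnt2]
          simp
        · rw [if_neg hy, hd1, hcnt2]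
          have : (nums[leftN k r] == y) = false := by rw [beq_eq_false_iff_ne]; exact fun h => hy h.symm
          simp [this]
      have huc2 : (if ((d.modify nums[r] 0 (· + 1)).modify nums[leftN k r] 0 (· - 1)).getD nums[leftN k r] 0 == 0
            then uct (W ++ [nums[r]]) - 1
          else if ((d.modify nums[r] 0 (· + 1)).modify nums[leftN k r] 0 (· - 1)).getD nums[leftN k r] 0 == 1
            then uct (W ++ [nums[r]]) + 1 else uct (W ++ [nums[r]]))
          = uct (winA nums k (r+1)) := by
        apply uc_step_remove _ _ _ (by rw [hW2]) _ (hd2 _)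
      refine ⟨(d.modify nums[r] 0 (· + 1)).modify nums[leftN k r] 0 (· - 1), ?_, hd2⟩
      simp only [aStep, hx, hrm]
      rw [if_pos (by exact_mod_cast hk)]
      simp only [huc1, huc2, TA, hlN, Prod.mk.injEq, ge_iff_le]
      refine ⟨trivial, by push_cast; ring, trivial, ?_⟩
      split_ifs with h
      · rfl
      · omega
    · -- no removal
      have hlN : leftN k (r+1) = leftN k r := by simp [leftN, hk]
      have hWeq : winA nums k (r+1) = W ++ [nums[r]] := by
        rw [winA, hlN, hW1]
      refine ⟨d.modify nums[r] 0 (· + 1), ?_, by rw [hWeq]; exact hd1⟩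
      simp only [aStep, hx]
      rw [if_neg (by exact_mod_cast hk)]
      simp only [huc1, TA, hlN, hWeq, Prod.mk.injEq, ge_iff_le]
      refine ⟨trivial, trivial, trivial, ?_⟩
      split_ifs with h
      · rfl
      · omega

lemma A_eq_TA (nums : List Int) (k : Int) :
    slidingWindowUniqueElementsSum nums k = TA nums k nums.length := by
  obtain ⟨d, hfold, -⟩ := A_fold nums k nums.length le_rfl
  simp only [slidingWindowUniqueElementsSum, hfold]

lemma leftN_of_nonpos {k : Int} (hk : k ≤ 0) (r : Nat) : leftN k r = r := by
  induction r with
  | zero => rfl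
  | succ r ih => simp [leftN, ih, show k ≤ (r:Int) by omega]

lemma winA_of_nonpos {k : Int} (hk : k ≤ 0) (nums : List Int) (r : Nat) :
    winA nums k r = [] := by
  rw [winA, leftN_of_nonpos hk]
  exact List.drop_eq_nil_of_le (by rw [List.length_take]; omega)

lemma TA_of_nonpos {k : Int} (hk : k ≤ 0) (nums : List Int) (r : Nat) :
    TA nums k r = 0 := by
  induction r with
  | zero => rfl
  | succ r ih => simp [TA, ih, winA_of_nonpos hk, uct_nil]

lemma leftN_of_pos {k : Int} (hk : 0 < k) (r : Nat) : leftN k r = r - min r k.toNat := by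
  have hcast : ((k.toNat : Nat) : Int) = k := Int.toNat_of_nonneg hk.le
  induction r with
  | zero => rfl
  | succ r ih =>
    rw [leftN, ih]
    by_cases h : k ≤ (r:Int)
    · have : k.toNat ≤ r := by omega
      simp [h]; omega
    · have : r < k.toNat := by omega
      simp [h]; omega

lemma winA_of_pos_ge {k : Int} (hk : 0 < k) (nums : List Int) (r : Nat)
    (hkr : k.toNat ≤ r) (hr : r ≤ nums.length) :
    winA nums k r = (nums.drop (r - k.toNat)).take k.toNat := by
  rw [winA, leftN_of_pos hk, min_eq_right hkr, List.drop_take]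
  congr 1
  omega

lemma TA_ge {k : Int} (hk : 0 < k) (nums : List Int) (hkn : k.toNat ≤ nums.length)
    (r : Nat) (hr : r ≤ nums.length) :
    TA nums k r
      = ((List.range (r - (k.toNat - 1))).map
          (fun i => uct ((nums.drop i).take k.toNat))).sum := by
  have hcast : ((k.toNat : Nat) : Int) = k := Int.toNat_of_nonneg hk.le
  have hk1 : 1 ≤ k.toNat := by omega
  induction r with
  | zero => simp [TA, show 0 - (k.toNat - 1) = 0 by omega]
  | succ r ih =>
    have hrn : r < nums.length := hr
    rw [TA, ih (by omega)]
    by_cases hcond : k.toNat - 1 ≤ r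
    · have hc1 : k - 1 ≤ (r:Int) := by omega
      rw [if_pos (Or.inl hc1)]
      have hwin : winA nums k (r+1) = (nums.drop (r + 1 - k.toNat)).take k.toNat :=
        winA_of_pos_ge hk nums (r+1) (by omega) (by omega)
      have hrange : (r + 1) - (k.toNat - 1) = (r - (k.toNat - 1)) + 1 := by omega
      have hidx : r + 1 - k.toNat = r - (k.toNat - 1) := by omega
      rw [hrange, List.range_succ, List.map_append, List.sum_append, hwin, hidx]
      simp
    · have hc1 : ¬ (k - 1 ≤ (r:Int)) := by omega
      have hc2 : ¬ ((r:Int) = (nums.length:Int) - 1) := by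
        intro h; have : r = nums.length - 1 := by omega
        omega
      rw [if_neg (by tauto)]
      have : (r + 1) - (k.toNat - 1) = 0 := by omega
      rw [this, show r - (k.toNat - 1) = 0 by omega]
      omega

lemma winA_of_pos_lt {k : Int} (hk : 0 < k) (nums : List Int) (r : Nat) (hkr : r ≤ k.toNat) :
    winA nums k r = nums.take r := by
  rw [winA, leftN_of_pos hk, min_eq_left hkr]
  simp

lemma TA_lt {k : Int} (hk : 0 < k) (nums : List Int) (hkn : nums.length < k.toNat)
    (r : Nat) (hr : r ≤ nums.length) :
    TA nums k r = if r = nums.length ∧ 0 < nums.length then uct nums else 0 := by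
  have hcast : ((k.toNat : Nat) : Int) = k := Int.toNat_of_nonneg hk.le
  induction r with
  | zero =>
    rw [TA]
    rcases Nat.eq_zero_or_pos nums.length with h | h
    · have hnil : nums = [] := List.length_eq_zero_iff.mp h
      simp [hnil, uct_nil]
    · simp [show ¬(0 = nums.length ∧ 0 < nums.length) by omega]
  | succ r ih =>
    have hc1 : ¬ (k - 1 ≤ (r:Int)) := by omega
    rw [TA, ih (by omega), if_neg (by omega)]
    by_cases hend : r + 1 = nums.length
    · have hc2 : (r:Int) = (nums.length:Int) - 1 := by omega
      rw [if_pos (Or.inr hc2), if_pos (by omega)]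
      have : winA nums k (r+1) = nums.take (r+1) := winA_of_pos_lt hk nums (r+1) (by omega)
      rw [this, hend, List.take_length]
      ring
    · have hc2 : ¬ ((r:Int) = (nums.length:Int) - 1) := by omega
      rw [if_neg (by tauto), if_neg (by omega)]
      ring

lemma alt_unfold (nums : List Int) (k : Int) :
    slidingWindowUniqueElementsSum_alt nums k
      = if k ≤ 0 then (0:Int) else
          ((PySem.List.pyRange 0 (max (((nums.length:Int)) - k + 1) 1) 1).map
            (fun i => uniqueCountAlt (PySem.List.slice nums (some i) (some (i + k))))).sum := rfl

lemma alt_pos_ge {k : Int} (hk : 0 < k) (nums : List Int) (hkn : k.toNat ≤ nums.length) :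
    slidingWindowUniqueElementsSum_alt nums k
      = ((List.range (nums.length - k.toNat + 1)).map
          (fun i => uct ((nums.drop i).take k.toNat))).sum := by
  have hcast : ((k.toNat : Nat) : Int) = k := Int.toNat_of_nonneg hk.le
  rw [alt_unfold, if_neg (by omega)]
  have hm : max ((nums.length:Int) - k + 1) 1 = ((nums.length - k.toNat + 1 : Nat) : Int) := by
    push_cast; omega
  rw [hm, PySem.List.pyRange_one, List.map_map]
  congr 1
  rw [show (((nums.length - k.toNat + 1 : Nat) : Int) - 0).toNat = nums.length - k.toNat + 1 by omega]
  apply List.map_congr_left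
  intro j hj
  simp only [Function.comp_apply, zero_add]
  have hsl : PySem.List.slice nums (some (j:Int)) (some ((j:Int) + k)) = (nums.drop j).take k.toNat := by
    conv_lhs => rw [← hcast]
    exact PySem.List.slice_natCast_add nums j k.toNat
  rw [hsl, uniqueCountAlt_eq]

lemma alt_pos_lt {k : Int} (hk : 0 < k) (nums : List Int) (hkn : nums.length < k.toNat) :
    slidingWindowUniqueElementsSum_alt nums k = uct nums := by
  have hcast : ((k.toNat : Nat) : Int) = k := Int.toNat_of_nonneg hk.le
  rw [alt_unfold, if_neg (by omega)]
  have hm : max ((nums.length:Int) - k + 1) 1 = 1 := by omega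
  have hone : PySem.List.pyRange 0 1 1 = [0] := by decide
  rw [hm, hone]
  simp only [List.map_cons, List.map_nil, List.sum_cons, List.sum_nil, add_zero, zero_add]
  rw [PySem.List.slice_zero_start, PySem.List.slice_to _ hk.le, uniqueCountAlt_eq,
    List.take_of_length_le (by omega)]

lemma mainX (nums : List Int) (k : Int) :
    slidingWindowUniqueElementsSum nums k = slidingWindowUniqueElementsSum_alt nums k := by
  by_cases hk : k ≤ 0
  · rw [A_eq_TA, TA_of_nonpos hk, alt_unfold, if_pos hk]
  · push_neg at hk
    by_cases hkn : k.toNat ≤ nums.length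
    · rw [A_eq_TA, TA_ge hk nums hkn nums.length le_rfl, alt_pos_ge hk nums hkn]
      rw [show nums.length - (k.toNat - 1) = nums.length - k.toNat + 1 by omega]
    · push_neg at hkn
      rw [A_eq_TA, TA_lt hk nums hkn nums.length le_rfl, alt_pos_lt hk nums hkn]
      rcases Nat.eq_zero_or_pos nums.length with h | h
      · have hnil : nums = [] := List.length_eq_zero_iff.mp h
        simp [hnil, uct_nil]
      · rw [if_pos ⟨rfl, h⟩]

-- ===== VERDICT (by name: the statement is the Claim_ definition above) =====
theorem slidingWindowUniqueElementsSum_spec : Claim_equal_slidingWindowUniqueElementsSum := by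
  intro nums k _
  unfold Spec_slidingWindowUniqueElementsSum
  exact mainX nums k
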